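-- pv_equiv track=rewrite | github.com/Schromeo/CodingStepByStep | OAPrepare/CS/bubbles.py | solution
-- ===== SOURCE A (Python) =====
-- def solution(bubbles, operations):
--     # n = 行数, m = 列数 (与你代码中的 n, m 保持一致)
--     rows_n = len(bubbles)
--     cols_m = len(bubbles[0])
--
--     # --- 阶段 1: 气泡消除 ---
--
--     # 定义 5 个检查方向：(0,0)是单元格自身
--     # (1,1), (1,-1), (-1,1), (-1,-1) 是四个对角线
--     diagonal_and_self = [(0, 0), (1, 1), (1, -1), (-1, 1), (-1, -1)]
--
--     for x, y in operations:
--         clicked_color = bubbles[x][y]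
--
--         # 优化：如果点击的是空格子 (0)，则什么也不做，跳到下一次操作
--         if clicked_color == 0:
--             continue
--
--         for dx, dy in diagonal_and_self:
--             target_row = x + dx
--             target_col = y + dy
--
--             # 检查目标坐标是否在棋盘内
--             is_in_bounds = (0 <= target_row < rows_n) and (0 <= target_col < cols_m)
--
--             if is_in_bounds and bubbles[target_row][target_col] == clicked_color:
--                 # 戳破气泡 (设置为空)
--                 bubbles[target_row][target_col] = 0
--
--     # --- 阶段 2: 重力下落 ---
--
--     # 我们必须逐 *列* 处理
--     for j in range(cols_m):
--
--         # "last" (你代码中的) 是 "写入指针" (writer_pointer)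
--         # 它指向下一个 "非空" 气泡应该被移动到的 *最上方* (即索引最大) 的空槽。
--         # 我们从最底部的行开始 (rows_n - 1)。
--         writer_row = rows_n - 1
--
--         # "i" (你代码中的) 是 "读取指针" (reader_pointer)
--         # 我们从下往上 (n-1 到 0) 遍历该列中的所有单元格。
--         for reader_row in range(rows_n - 1, -1, -1):
--
--             # 你的代码: if last != i:
--             #   bubbles[last][j] = bubbles[i][j]
--             #   bubbles[i][j] = 0
--             # 你的代码: last -= bubbles[last][j] != 0
--
--             # --- 下面是你重力算法的逻辑分解 ---
--
--             # 1. 检查 "读取" 的单元格是否包含一个气泡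
--             if bubbles[reader_row][j] != 0:
--                 # 2. 如果 "读取" 和 "写入" 指针不在同一位置
--                 if writer_row != reader_row:
--                     # 将气泡从 [reader_row] "移动" 到 [writer_row]
--                     bubbles[writer_row][j] = bubbles[reader_row][j]
--                     bubbles[reader_row][j] = 0 # 清空旧位置
--
--                 # 3. 移动 "写入" 指针
--                 # (因为 writer_row 这一行现在被占用了,
--                 #  下一个气泡必须放在它的 *上方*)
--                 writer_row -= 1
--
--         # 循环结束后，writer_row 指向最上面的一个空槽
--         # (或 -1，如果该列已满)。
--         # 剩下的所有 "顶部" 单元格 (从 0 到 writer_row) 都应为空。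
--         # (在你的精炼算法中，这一步是隐式完成的，
--         #  因为不匹配的 `0` 会被移动和覆盖)
--         #
--         # 我们可以添加一个显式的 "清空顶部" 循环，
--         # 这会让逻辑更清晰，虽然你那个版本也正确。
--         while writer_row >= 0:
--             bubbles[writer_row][j] = 0
--             writer_row -= 1
--
--     return bubbles
-- ===== SOURCE B (Python) =====
-- def solution(bubbles, operations):
--     # B: pop phase rewritten as a whole-board predicate scan per operation
--     # (a cell is popped iff it matches the clicked color and is the clicked
--     # cell or one of its four diagonal neighbors); gravity rewritten as
--     # gather-and-rebuild per column. Mutates bubbles in place, like A.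
--     for x, y in operations:
--         color = bubbles[x][y]
--         if color == 0:
--             continue
--         for i, row in enumerate(bubbles):
--             row[:] = [0 if v == color and ((i == x and j == y) or
--                                            (abs(i - x) == 1 and abs(j - y) == 1))
--                       else v
--                       for j, v in enumerate(row)]
--     rows_n = len(bubbles)
--     for j in range(len(bubbles[0])):
--         vals = [bubbles[i][j] for i in range(rows_n) if bubbles[i][j] != 0]
--         k = rows_n - len(vals)
--         for i in range(rows_n):
--             bubbles[i][j] = 0 if i < k else vals[i - k]
--     return bubbles
-- ===== Notes on version B (the rewrite author's own statement) =====
-- stated objective: alternative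
-- what changed: The popping phase becomes a whole-board rebuild per operation using a closed-form neighbourhood predicate (cell popped iff it matches the clicked color and is the clicked cell or a diagonal neighbour) instead of A's bounds-checked offset loop with in-place writes, and the gravity phase becomes gather-and-rebuild per column (collect the non-zeros top-to-bottom, then write zeros followed by them) instead of A's bottom-up two-pointer compaction plus an explicit clear-top loop.
-- outside the precondition, e.g. on solution([[1, 1], [1, 1, 1]], [(1, 2)]): A returns [[1, 0], [1, 1, 1]], B returns [[1, 0], [1, 1, 0]]; on solution([[1], [2, 3]], []): A returns [[1], [2, 3]], B returns [[1], [2, 3]]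
import Mathlib
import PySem

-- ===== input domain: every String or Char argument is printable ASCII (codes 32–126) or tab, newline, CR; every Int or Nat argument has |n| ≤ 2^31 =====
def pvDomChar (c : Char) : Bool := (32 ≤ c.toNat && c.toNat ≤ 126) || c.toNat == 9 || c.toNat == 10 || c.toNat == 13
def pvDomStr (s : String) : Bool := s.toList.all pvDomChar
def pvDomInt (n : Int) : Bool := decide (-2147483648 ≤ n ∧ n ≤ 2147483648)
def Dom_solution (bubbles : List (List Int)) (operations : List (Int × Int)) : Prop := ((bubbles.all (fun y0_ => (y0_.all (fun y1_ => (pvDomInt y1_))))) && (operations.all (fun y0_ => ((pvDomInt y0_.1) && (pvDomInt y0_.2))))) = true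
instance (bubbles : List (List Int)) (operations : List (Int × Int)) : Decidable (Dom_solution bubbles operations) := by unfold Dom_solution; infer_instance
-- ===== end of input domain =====

-- B pops by a whole-board predicate rebuild per operation and applies gravity by
-- gather-and-rebuild per column, instead of A's offset loop and two-pointer
-- compaction; same return value (in Python both A and B also mutate `bubbles` in place).

-- ===== PORT A =====
-- shared cell read bubbles[x][y], totalised with defaults; exact whenever the indices
-- are valid Python indices (guaranteed by Pre_ / by the bounds checks around each read)
def pvGetCell (b : List (List Int)) (x y : Int) : Int :=
  PySem.List.pyGetD (PySem.List.pyGetD b x []) y 0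

-- in-place write bubbles[r][c] = v (in-range Nat indices) as a functional update
def pvSet (b : List (List Int)) (r c : Nat) (v : Int) : List (List Int) :=
  b.set r ((b.getD r []).set c v)

def pvDirs : List (Int × Int) := [(0, 0), (1, 1), (1, -1), (-1, 1), (-1, -1)]

-- the body of A's inner `for dx, dy in diagonal_and_self` loop
def pvPopStepA (rows cols x y color : Int) (bb : List (List Int)) (d : Int × Int) :
    List (List Int) :=
  if 0 ≤ x + d.1 ∧ x + d.1 < rows ∧ 0 ≤ y + d.2 ∧ y + d.2 < cols ∧
      pvGetCell bb (x + d.1) (y + d.2) = color then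
    pvSet bb (x + d.1).toNat (y + d.2).toNat 0
  else bb

-- one operation of A's phase 1
def pvPopA (rows cols : Int) (b : List (List Int)) (op : Int × Int) : List (List Int) :=
  let color := pvGetCell b op.1 op.2
  if color = 0 then b
  else pvDirs.foldl (pvPopStepA rows cols op.1 op.2 color) b

-- one reader step of A's phase 2 (state = (board, writer_row))
def pvGravStepA (j : Int) (s : List (List Int) × Int) (r : Int) : List (List Int) × Int :=
  if pvGetCell s.1 r j ≠ 0 then
    (if s.2 ≠ r then pvSet (pvSet s.1 s.2.toNat j.toNat (pvGetCell s.1 r j)) r.toNat j.toNat 0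
     else s.1, s.2 - 1)
  else s

-- A's trailing `while writer_row >= 0` clearing loop
def pvClearTopA (b : List (List Int)) (w : Int) (j : Int) : List (List Int) :=
  if h : 0 ≤ w then pvClearTopA (pvSet b w.toNat j.toNat 0) (w - 1) j else b
termination_by (w + 1).toNat
decreasing_by omega

def solution (bubbles : List (List Int)) (operations : List (Int × Int)) : List (List Int) :=
  let rows : Int := bubbles.length
  let cols : Int := (bubbles.headD []).length
  let b1 := operations.foldl (pvPopA rows cols) bubbles
  (PySem.List.pyRange 0 cols 1).foldl (fun b j =>
    let s := (PySem.List.pyRange (rows - 1) (-1) (-1)).foldl (pvGravStepA j) (b, rows - 1)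
    pvClearTopA s.1 s.2 j) b1

-- ===== PORT B =====
-- one operation of B's phase 1: rebuild every row with the neighbourhood predicate
def pvPopScanB (x y color : Int) (b : List (List Int)) : List (List Int) :=
  b.mapIdx (fun i row => row.mapIdx (fun j v =>
    if v = color ∧ (((i : Int) = x ∧ (j : Int) = y) ∨
                    (((i : Int) - x).natAbs = 1 ∧ ((j : Int) - y).natAbs = 1))
    then 0 else v))

def pvPopB (b : List (List Int)) (op : Int × Int) : List (List Int) :=
  let color := pvGetCell b op.1 op.2
  if color = 0 then b
  else pvPopScanB op.1 op.2 color b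

-- B's gravity for one column: gather the non-zeros, then rewrite the column
def pvGravColB (b : List (List Int)) (j : Nat) : List (List Int) :=
  let vals := ((List.range b.length).map (fun i => (b.getD i []).getD j 0)).filter
    (fun v => v ≠ 0)
  let k := b.length - vals.length
  b.mapIdx (fun i row => row.set j (if i < k then 0 else vals.getD (i - k) 0))

def solution_alt (bubbles : List (List Int)) (operations : List (Int × Int)) : List (List Int) :=
  let b1 := operations.foldl pvPopB bubbles
  (List.range (b1.headD []).length).foldl pvGravColB b1

-- ===== PRECONDITION & SPEC =====
-- Pre_ excludes inputs on which A raises IndexError (the empty board, rows shorter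
-- than the first row, operation coordinates outside Python's index range) and, for
-- that, requires the board rectangular: boards whose later rows are LONGER than the
-- first row would have A silently ignore the extra columns — an artefact of A reading
-- the width from row 0 — so they are excluded as well.
def Pre_solution (bubbles : List (List Int)) (operations : List (Int × Int)) : Prop :=
  bubbles ≠ [] ∧
  (∀ row ∈ bubbles, row.length = (bubbles.headD []).length) ∧
  (∀ p ∈ operations,
    -(bubbles.length : Int) ≤ p.1 ∧ p.1 < bubbles.length ∧
    -((bubbles.headD []).length : Int) ≤ p.2 ∧ p.2 < (bubbles.headD []).length)

instance (bubbles : List (List Int)) (operations : List (Int × Int)) : Decidable (Pre_solution bubbles operations) := by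
  unfold Pre_solution; infer_instance

def pvWitness_solution : List (List Int) × (List (Int × Int)) := ([[1, 0], [0, 1]], [(0, 0), (-1, -1)])

def Spec_solution (bubbles : List (List Int)) (operations : List (Int × Int)) (out : List (List Int)) : Prop := out = solution_alt bubbles operations
instance (bubbles : List (List Int)) (operations : List (Int × Int)) (out : List (List Int)) : Decidable (Spec_solution bubbles operations out) := by unfold Spec_solution; infer_instance

-- ===== CLAIM (what is proved, stated in full; the proofs are below) =====
def Claim_equal_solution : Prop := ∀ (bubbles : List (List Int)) (operations : List (Int × Int)), Dom_solution bubbles operations → Pre_solution bubbles operations → Spec_solution bubbles operations (solution bubbles operations)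

-- ===== LEMMAS AND PROOFS =====
def pvShape (n m : Nat) (b : List (List Int)) : Prop :=
  b.length = n ∧ ∀ row ∈ b, row.length = m
def pvCell (b : List (List Int)) (i j : Nat) : Int := (b.getD i []).getD j 0

theorem pvGetD_set (l : List Int) (i c : Nat) (v : Int) (hc : c < l.length) :
    (l.set c v).getD i 0 = if i = c then v else l.getD i 0 := by
  rcases Nat.lt_or_ge i l.length with h | h
  · rw [List.getD_eq_getElem _ _ (by simpa using h), List.getElem_set]
    split_ifs with h1 h2 h3
    · rfl
    · omega
    · omega
    · exact (List.getD_eq_getElem _ _ h).symm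
  · rw [if_neg (by omega), List.getD_eq_default _ _ (by simpa using h),
      List.getD_eq_default _ _ h]

theorem pvGetD_set_row (l : List (List Int)) (i r : Nat) (row : List Int) (hr : r < l.length) :
    (l.set r row).getD i [] = if i = r then row else l.getD i [] := by
  rcases Nat.lt_or_ge i l.length with h | h
  · rw [List.getD_eq_getElem _ _ (by simpa using h), List.getElem_set]
    split_ifs with h1 h2 h3
    · rfl
    · omega
    · omega
    · exact (List.getD_eq_getElem _ _ h).symm
  · rw [if_neg (by omega), List.getD_eq_default _ _ (by simpa using h),
      List.getD_eq_default _ _ h]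

theorem pvRow_len {n m : Nat} {b : List (List Int)} (h : pvShape n m b) {i : Nat} (hi : i < n) :
    (b.getD i []).length = m := by
  have hl : i < b.length := by rw [h.1]; omega
  rw [List.getD_eq_getElem _ _ hl]
  exact h.2 _ (List.getElem_mem hl)

theorem pvShape_set {n m : Nat} {b : List (List Int)} (h : pvShape n m b)
    {r : Nat} (hr : r < n) (c : Nat) (v : Int) : pvShape n m (pvSet b r c v) := by
  refine ⟨by simp [pvSet, h.1], ?_⟩
  intro row hrow
  rcases List.mem_or_eq_of_mem_set hrow with h2 | h2
  · exact h.2 _ h2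
  · rw [h2]; simpa using pvRow_len h hr

theorem pvCell_set {n m : Nat} {b : List (List Int)} (h : pvShape n m b)
    {r c : Nat} (hr : r < n) (hc : c < m) (v : Int) (i j : Nat) :
    pvCell (pvSet b r c v) i j = if i = r ∧ j = c then v else pvCell b i j := by
  unfold pvCell pvSet
  rw [pvGetD_set_row _ _ _ _ (by rw [h.1]; omega : r < b.length)]
  by_cases hir : i = r
  · subst hir
    rw [if_pos rfl, pvGetD_set _ _ _ _ (by rw [pvRow_len h hr]; omega)]
    simp
  · simp [hir]

theorem pvCell_eq_getElem {n m : Nat} {b : List (List Int)} (h : pvShape n m b)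
    {i j : Nat} (hi : i < n) (hj : j < m) (hib : i < b.length) (hjb : j < b[i].length) :
    pvCell b i j = b[i][j] := by
  unfold pvCell
  rw [List.getD_eq_getElem _ _ hib, List.getD_eq_getElem _ _ hjb]

theorem pvEq_of_cells {n m : Nat} {b1 b2 : List (List Int)} (h1 : pvShape n m b1)
    (h2 : pvShape n m b2) (hc : ∀ i j, i < n → j < m → pvCell b1 i j = pvCell b2 i j) :
    b1 = b2 := by
  apply List.ext_getElem (by rw [h1.1, h2.1])
  intro i hi hi2
  have hn1 := h1.1
  have hrl1 : b1[i].length = m := h1.2 _ (List.getElem_mem hi)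
  have hrl2 : b2[i].length = m := h2.2 _ (List.getElem_mem hi2)
  apply List.ext_getElem (by rw [hrl1, hrl2])
  intro j hj hj2
  have := hc i j (by omega) (by omega)
  rwa [pvCell_eq_getElem h1 (by omega) (by omega) hi hj,
    pvCell_eq_getElem h2 (by omega) (by omega) hi2 hj2] at this

theorem pvGetCell_eq_cell {n m : Nat} {b : List (List Int)} (h : pvShape n m b)
    {x y : Int} (hx : 0 ≤ x) (hxn : x < (n : Int)) (hy : 0 ≤ y) (hym : y < (m : Int)) :
    pvGetCell b x y = pvCell b x.toNat y.toNat := by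
  obtain ⟨i, rfl⟩ : ∃ i : Nat, x = (i : Int) := ⟨x.toNat, by omega⟩
  obtain ⟨j, rfl⟩ : ∃ j : Nat, y = (j : Int) := ⟨y.toNat, by omega⟩
  unfold pvGetCell pvCell
  simp [PySem.List.pyGetD_natCast]

theorem pvShape_popStepA {n m : Nat} {b : List (List Int)} (h : pvShape n m b)
    (x y color : Int) (d : Int × Int) : pvShape n m (pvPopStepA n m x y color b d) := by
  unfold pvPopStepA
  split_ifs with hC
  · exact pvShape_set h (by omega) _ _
  · exact h

theorem pvShape_foldA {n m : Nat} (x y color : Int) :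
    ∀ (ds : List (Int × Int)) (b : List (List Int)), pvShape n m b →
      pvShape n m (ds.foldl (pvPopStepA n m x y color) b) := by
  intro ds
  induction ds with
  | nil => intro b h; exact h
  | cons d ds ih => intro b h; exact ih _ (pvShape_popStepA h x y color d)

theorem pvCell_foldA {n m : Nat} {x y color : Int} (hcolor : color ≠ 0) :
    ∀ (ds : List (Int × Int)) (b : List (List Int)), pvShape n m b →
      ∀ i j, i < n → j < m →
      pvCell (ds.foldl (pvPopStepA n m x y color) b) i j =
        if (∃ d ∈ ds, x + d.1 = (i : Int) ∧ y + d.2 = (j : Int)) ∧ pvCell b i j = color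
        then 0 else pvCell b i j := by
  intro ds
  induction ds with
  | nil => intro b h i j hi hj; simp
  | cons d ds ih =>
    intro b h i j hi hj
    rw [List.foldl_cons, ih _ (pvShape_popStepA h x y color d) i j hi hj]
    by_cases hm : x + d.1 = (i : Int) ∧ y + d.2 = (j : Int)
    · by_cases hcell : pvCell b i j = color
      · have hC : pvPopStepA (n : Int) (m : Int) x y color b d = pvSet b i j 0 := by
          unfold pvPopStepA
          rw [if_pos]
          · rw [hm.1, hm.2]; simp
          · refine ⟨by omega, by omega, by omega, by omega, ?_⟩
            rw [hm.1, hm.2,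
              pvGetCell_eq_cell h (by omega) (by omega) (by omega) (by omega)]
            simpa using hcell
        have hcs : pvCell (pvPopStepA (n : Int) (m : Int) x y color b d) i j = 0 := by
          rw [hC, pvCell_set h hi hj 0 i j]; simp
        rw [hcs, if_neg (fun hcon => hcolor hcon.2.symm),
          if_pos ⟨⟨d, by simp, hm⟩, hcell⟩]
      · have hC : pvPopStepA (n : Int) (m : Int) x y color b d = b := by
          unfold pvPopStepA
          rw [if_neg]
          intro hcon
          apply hcell
          have hthis := hcon.2.2.2.2
          rw [hm.1, hm.2,
            pvGetCell_eq_cell h (by omega) (by omega) (by omega) (by omega)] at hthis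
          simpa using hthis
        rw [hC, if_neg (fun hcon => hcell hcon.2), if_neg (fun hcon => hcell hcon.2)]
    · have hC : pvCell (pvPopStepA (n : Int) (m : Int) x y color b d) i j = pvCell b i j := by
        unfold pvPopStepA
        split_ifs with hc2
        · rw [pvCell_set h (by omega) (by omega) 0 i j, if_neg]
          intro hcon
          exact hm ⟨by omega, by omega⟩
        · rfl
      rw [hC]
      congr 1
      simp only [List.exists_mem_cons_iff, eq_iff_iff]
      constructor
      · rintro ⟨hd, hc⟩; exact ⟨Or.inr hd, hc⟩
      · rintro ⟨hd | hd, hc⟩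
        · exact absurd hd hm
        · exact ⟨hd, hc⟩

theorem pvShape_popScanB {n m : Nat} {b : List (List Int)} (h : pvShape n m b)
    (x y color : Int) : pvShape n m (pvPopScanB x y color b) := by
  refine ⟨by simp [pvPopScanB, h.1], ?_⟩
  intro row hrow
  simp only [pvPopScanB, List.mem_iff_getElem] at hrow
  obtain ⟨i, hi, rfl⟩ := hrow
  simp only [List.getElem_mapIdx, List.length_mapIdx]
  exact h.2 _ (List.getElem_mem (by simpa using hi))

theorem pvCell_popScanB {n m : Nat} {b : List (List Int)} (h : pvShape n m b)
    (x y color : Int) {i j : Nat} (hi : i < n) (hj : j < m) :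
    pvCell (pvPopScanB x y color b) i j =
      if pvCell b i j = color ∧ (((i : Int) = x ∧ (j : Int) = y) ∨
          (((i : Int) - x).natAbs = 1 ∧ ((j : Int) - y).natAbs = 1))
      then 0 else pvCell b i j := by
  have hib : i < b.length := by rw [h.1]; omega
  have hjb : j < b[i].length := by rw [h.2 _ (List.getElem_mem hib)]; omega
  have hs := pvShape_popScanB h x y color
  have hib2 : i < (pvPopScanB x y color b).length := by rw [hs.1]; omega
  have hjb2 : j < (pvPopScanB x y color b)[i].length := by
    rw [hs.2 _ (List.getElem_mem hib2)]; omega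
  rw [pvCell_eq_getElem hs hi hj hib2 hjb2, pvCell_eq_getElem h hi hj hib hjb]
  simp only [pvPopScanB, List.getElem_mapIdx]

theorem pvPop_eq {n m : Nat} {b : List (List Int)} (h : pvShape n m b) (op : Int × Int) :
    pvPopA n m b op = pvPopB b op := by
  unfold pvPopA pvPopB
  by_cases hc : pvGetCell b op.1 op.2 = 0
  · simp [hc]
  · simp only [if_neg hc]
    apply pvEq_of_cells (pvShape_foldA _ _ _ _ _ h) (pvShape_popScanB h _ _ _)
    intro i j hi hj
    rw [pvCell_foldA hc _ _ h i j hi hj, pvCell_popScanB h _ _ _ hi hj]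
    congr 1
    simp only [pvDirs, List.exists_mem_cons_iff, List.not_mem_nil, false_and, exists_false,
      or_false, eq_iff_iff]
    constructor
    · rintro ⟨hd, hcell⟩; exact ⟨hcell, by omega⟩
    · rintro ⟨hcell, hd⟩; exact ⟨by omega, hcell⟩

def pvColVals (b : List (List Int)) (j p : Nat) : List Int :=
  ((b.drop p).map (fun row => row.getD j 0)).filter (fun v => v ≠ 0)

def pvGravInv (b : List (List Int)) (j n m : Nat) (s : List (List Int) × Int) (p : Nat) : Prop :=
  pvShape n m s.1 ∧
  s.2 = (n : Int) - 1 - (pvColVals b j p).length ∧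
  (∀ i j', i < n → j' < m → j' ≠ j → pvCell s.1 i j' = pvCell b i j') ∧
  (∀ i, i < p → pvCell s.1 i j = pvCell b i j) ∧
  (∀ i, i < n → s.2 < (i : Int) → pvCell s.1 i j = (pvColVals b j p).getD (i - (s.2 + 1).toNat) 0)

theorem pvColVals_len {b : List (List Int)} {n : Nat} (hb : b.length = n) (j p : Nat) :
    (pvColVals b j p).length ≤ n - p := by
  calc (pvColVals b j p).length ≤ ((b.drop p).map (fun row => row.getD j 0)).length :=
        List.length_filter_le _ _
    _ = n - p := by simp [hb]

theorem pvColVals_cons {b : List (List Int)} {n : Nat} (hb : b.length = n) {j p : Nat}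
    (hp : p < n) :
    pvColVals b j p = if pvCell b p j ≠ 0 then pvCell b p j :: pvColVals b j (p + 1)
      else pvColVals b j (p + 1) := by
  have hpb : p < b.length := by omega
  unfold pvColVals
  rw [List.drop_eq_getElem_cons hpb, List.map_cons, List.filter_cons]
  have : pvCell b p j = b[p].getD j 0 := by
    unfold pvCell; rw [List.getD_eq_getElem _ _ hpb]
  rw [← this]
  by_cases hz : pvCell b p j = 0 <;> simp [hz]

theorem pvGravStep_inv {b : List (List Int)} {j n m : Nat} {s : List (List Int) × Int}
    {p : Nat} (hb : pvShape n m b) (hj : j < m) (hp : p < n)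
    (h : pvGravInv b j n m s (p + 1)) :
    pvGravInv b j n m (pvGravStepA (j : Int) s (p : Int)) p := by
  obtain ⟨h1, h2, h3, h4, h5⟩ := h
  have hlen1 : (pvColVals b j (p + 1)).length ≤ n - (p + 1) := pvColVals_len hb.1 _ _
  have hcell : pvGetCell s.1 (p : Int) (j : Int) = pvCell b p j := by
    rw [pvGetCell_eq_cell h1 (by omega) (by omega) (by omega) (by omega)]
    simpa using h4 p (by omega)
  unfold pvGravStepA
  rw [hcell]
  by_cases hz : pvCell b p j = 0
  · rw [if_neg (by simpa using hz)]
    refine ⟨h1, ?_, h3, fun i hi => h4 i (by omega), ?_⟩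
    · rw [pvColVals_cons hb.1 hp, if_neg (by simpa using hz)]; exact h2
    · intro i hi hwi
      rw [pvColVals_cons hb.1 hp, if_neg (by simpa using hz)]
      exact h5 i hi hwi
  · rw [if_pos (by simpa using hz)]
    have hvals : pvColVals b j p = pvCell b p j :: pvColVals b j (p + 1) := by
      rw [pvColVals_cons hb.1 hp, if_pos (by simpa using hz)]
    have hwp : (p : Int) ≤ s.2 := by omega
    by_cases hwr : s.2 = (p : Int)
    · rw [if_neg (by omega)]
      refine ⟨h1, by rw [hvals]; simp; omega, h3, fun i hi => h4 i (by omega), ?_⟩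
      intro i hi hwi
      dsimp only at hwi ⊢
      rcases Nat.eq_or_lt_of_le (show p ≤ i by omega) with hip | hip
      · rw [← hip] at hwi ⊢
        rw [hvals, show p - (s.2 - 1 + 1).toNat = 0 by omega, List.getD_cons_zero]
        simpa using h4 p (by omega)
      · rw [hvals, show i - (s.2 - 1 + 1).toNat = (i - (s.2 + 1).toNat) + 1 by omega,
          List.getD_cons_succ]
        exact h5 i hi (by omega)
    · have hwgt : (p : Int) < s.2 := by omega
      have hwn : s.2.toNat < n := by omega
      rw [if_pos (by omega)]
      have hs1 := pvShape_set (v := pvCell b p j) (c := (j : Int).toNat) h1 hwn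
      have hs2 := pvShape_set (v := 0) (c := (j : Int).toNat) hs1 (show ((p : Int)).toNat < n by omega)
      have hcellEq : ∀ i j', i < n → j' < m →
          pvCell (pvSet (pvSet s.1 s.2.toNat (j : Int).toNat (pvCell b p j)) ((p : Int)).toNat (j : Int).toNat 0) i j' =
            if i = p ∧ j' = j then 0
            else if i = s.2.toNat ∧ j' = j then pvCell b p j
            else pvCell s.1 i j' := by
        intro i j' hi hj'
        rw [pvCell_set hs1 (by omega) (by simpa using hj) 0 i j',
          pvCell_set h1 (by omega) (by simpa using hj) _ i j']
        simp only [Int.toNat_natCast]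
        rfl
      constructor
      · exact hs2
      constructor
      · dsimp only; rw [hvals]; simp; omega
      constructor
      · intro i j' hi hj' hne
        rw [hcellEq i j' hi hj', if_neg (by tauto), if_neg (by tauto)]
        exact h3 i j' hi hj' hne
      constructor
      · intro i hi
        rw [hcellEq i j (by omega) (by omega), if_neg (by omega), if_neg (by omega)]
        exact h4 i (by omega)
      · intro i hi hwi
        dsimp only at hwi ⊢
        rw [hcellEq i j hi hj]
        rcases Nat.eq_or_lt_of_le (show s.2.toNat ≤ i by omega) with hip | hip
        · rw [if_neg (by omega), if_pos ⟨by omega, rfl⟩, hvals,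
            show i - (s.2 - 1 + 1).toNat = 0 by omega, List.getD_cons_zero]
        · rw [if_neg (by omega), if_neg (by omega), hvals,
            show i - (s.2 - 1 + 1).toNat = (i - (s.2 + 1).toNat) + 1 by omega,
            List.getD_cons_succ]
          exact h5 i hi (by omega)

theorem pvGravFold_inv {b : List (List Int)} {j n m : Nat} (hb : pvShape n m b) (hj : j < m) :
    ∀ (p : Nat) (s : List (List Int) × Int), p ≤ n → pvGravInv b j n m s p →
      pvGravInv b j n m
        ((PySem.List.pyRange ((p : Int) - 1) (-1) (-1)).foldl (pvGravStepA (j : Int)) s) 0 := by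
  intro p
  induction p with
  | zero => intro s _ h; rw [PySem.List.pyRange_neg_one_eq_nil (by omega)]; exact h
  | succ q ih =>
    intro s hq h
    rw [show (((q + 1 : Nat) : Int) - 1) = (q : Int) by push_cast; omega,
      PySem.List.pyRange_neg_one_cons (by omega), List.foldl_cons]
    exact ih _ (by omega) (pvGravStep_inv hb hj (by omega) h)

theorem pvClearTop_cell {n m j : Nat} (hj : j < m) :
    ∀ (k : Nat) (w : Int) (bb : List (List Int)), (w + 1).toNat = k → pvShape n m bb →
      w < (n : Int) →
    pvShape n m (pvClearTopA bb w (j : Int)) ∧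
    (∀ i j', i < n → j' < m → pvCell (pvClearTopA bb w (j : Int)) i j' =
      if j' = j ∧ (i : Int) ≤ w then 0 else pvCell bb i j') := by
  intro k
  induction k with
  | zero =>
    intro w bb hk hs hw
    rw [pvClearTopA, dif_neg (by omega)]
    exact ⟨hs, fun i j' hi hj' => by rw [if_neg (by omega)]⟩
  | succ k ih =>
    intro w bb hk hs hw
    by_cases h0 : 0 ≤ w
    · rw [pvClearTopA, dif_pos h0]
      have hsetS := pvShape_set (v := (0 : Int)) (c := (j : Int).toNat) hs
        (show w.toNat < n by omega)
      obtain ⟨ihS, ihC⟩ := ih (w - 1) _ (by omega) hsetS (by omega)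
      refine ⟨ihS, ?_⟩
      intro i j' hi hj'
      rw [ihC i j' hi hj',
        pvCell_set hs (by omega) (by simpa using hj) _ i j']
      simp only [Int.toNat_natCast]
      by_cases hcol : j' = j
      · subst hcol
        by_cases hiw : (i : Int) ≤ w - 1
        · rw [if_pos ⟨rfl, hiw⟩, if_pos ⟨rfl, by omega⟩]
        · by_cases hieq : i = w.toNat
          · rw [if_neg (by omega), if_pos ⟨hieq, rfl⟩, if_pos ⟨rfl, by omega⟩]
          · rw [if_neg (by omega), if_neg (by tauto), if_neg (by omega)]
      · rw [if_neg (by tauto), if_neg (by tauto), if_neg (by tauto)]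
    · rw [pvClearTopA, dif_neg h0]
      exact ⟨hs, fun i j' hi hj' => by rw [if_neg (by omega)]⟩

theorem pvGetD_mapIdx_row (b : List (List Int)) (f : Nat → List Int → List Int) (i : Nat)
    (hib : i < b.length) : (b.mapIdx f).getD i [] = f i b[i] := by
  simp [List.getD, List.getElem?_mapIdx, List.getElem?_eq_getElem, hib]

theorem pvMap_range_getD (l : List (List Int)) (d : List Int) :
    (List.range l.length).map (fun i => l.getD i d) = l := by
  apply List.ext_getElem (by simp)
  intro i h1 h2
  simp [List.getD, List.getElem?_eq_getElem, h2]

theorem pvGravColB_vals (b : List (List Int)) (j : Nat) :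
    ((List.range b.length).map (fun i => (b.getD i []).getD j 0)).filter (fun v => v ≠ 0) =
      pvColVals b j 0 := by
  unfold pvColVals
  rw [List.drop_zero, show (fun i => (b.getD i []).getD j 0) =
    (fun row => row.getD j 0) ∘ (fun i => b.getD i []) from rfl, ← List.map_map,
    pvMap_range_getD]

theorem pvShape_gravColB {n m : Nat} {b : List (List Int)} (h : pvShape n m b) (j : Nat) :
    pvShape n m (pvGravColB b j) := by
  refine ⟨by simp [pvGravColB, h.1], ?_⟩
  intro row hrow
  simp only [pvGravColB, List.mem_iff_getElem] at hrow
  obtain ⟨i, hi, rfl⟩ := hrow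
  simp only [List.getElem_mapIdx, List.length_set]
  exact h.2 _ (List.getElem_mem (by simpa using hi))

theorem pvCell_gravColB {n m : Nat} {b : List (List Int)} (h : pvShape n m b)
    {i j j' : Nat} (hi : i < n) (hj : j < m) (hj' : j' < m) :
    pvCell (pvGravColB b j) i j' =
      if j' = j then
        (if i < b.length - (((List.range b.length).map (fun i => (b.getD i []).getD j 0)).filter
              (fun v => v ≠ 0)).length then 0
         else (((List.range b.length).map (fun i => (b.getD i []).getD j 0)).filter
              (fun v => v ≠ 0)).getD (i - (b.length - (((List.range b.length).map
                (fun i => (b.getD i []).getD j 0)).filter (fun v => v ≠ 0)).length)) 0)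
      else pvCell b i j' := by
  have hib : i < b.length := by rw [h.1]; omega
  have hjrow : j < b[i].length := by rw [h.2 _ (List.getElem_mem hib)]; omega
  unfold pvCell
  simp only [pvGravColB]
  rw [pvGetD_mapIdx_row _ _ _ hib, pvGetD_set _ _ _ _ hjrow,
    List.getD_eq_getElem b _ hib]

theorem pvGravCol_eq {n m : Nat} {b : List (List Int)} (hb : pvShape n m b) (hn : 0 < n)
    {j : Nat} (hj : j < m) :
    pvClearTopA
        ((PySem.List.pyRange ((n : Int) - 1) (-1) (-1)).foldl (pvGravStepA (j : Int))
          (b, (n : Int) - 1)).1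
        ((PySem.List.pyRange ((n : Int) - 1) (-1) (-1)).foldl (pvGravStepA (j : Int))
          (b, (n : Int) - 1)).2 (j : Int)
      = pvGravColB b j := by
  have hvnil : pvColVals b j n = [] := by
    unfold pvColVals
    rw [show b.drop n = [] from by rw [← hb.1]; simp]
    rfl
  have hInv0 : pvGravInv b j n m (b, (n : Int) - 1) n := by
    refine ⟨hb, by rw [hvnil]; simp, fun i j' _ _ _ => rfl, fun i _ => rfl, ?_⟩
    intro i hi hwi
    simp only at hwi
    omega
  have hInv := pvGravFold_inv hb hj n (b, (n : Int) - 1) le_rfl hInv0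
  set s := (PySem.List.pyRange ((n : Int) - 1) (-1) (-1)).foldl (pvGravStepA (j : Int))
    (b, (n : Int) - 1) with hsdef
  obtain ⟨hS, hW, hO, _, hSuf⟩ := hInv
  have hL : (pvColVals b j 0).length ≤ n := by
    have := pvColVals_len hb.1 j 0; omega
  obtain ⟨hCS, hCC⟩ := pvClearTop_cell hj _ s.2 s.1 rfl hS (by rw [hW]; omega)
  apply pvEq_of_cells hCS (pvShape_gravColB hb j)
  intro i j' hi hj'
  rw [hCC i j' hi hj', pvCell_gravColB hb hi hj hj']
  rw [pvGravColB_vals]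
  simp only [hb.1]
  by_cases hcol : j' = j
  · by_cases hik : i < n - (pvColVals b j 0).length
    · rw [if_pos ⟨hcol, by omega⟩, if_pos hcol, if_pos hik]
    · rw [if_neg (by push Not; intro _; omega), if_pos hcol, if_neg hik, hcol,
        hSuf i hi (by omega), show (s.2 + 1).toNat = n - (pvColVals b j 0).length by omega]
  · rw [if_neg (by tauto), if_neg hcol]
    exact hO i j' hi hj' hcol

theorem pvShape_popB {n m : Nat} {b : List (List Int)} (h : pvShape n m b) (op : Int × Int) :
    pvShape n m (pvPopB b op) := by
  by_cases hc : pvGetCell b op.1 op.2 = 0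
  · simpa [pvPopB, hc] using h
  · simpa [pvPopB, hc] using pvShape_popScanB h op.1 op.2 (pvGetCell b op.1 op.2)

theorem pvPops_shape {n m : Nat} :
    ∀ (ops : List (Int × Int)) (b : List (List Int)), pvShape n m b →
      pvShape n m (ops.foldl pvPopB b) := by
  intro ops
  induction ops with
  | nil => intro b h; exact h
  | cons op ops ih => intro b h; exact ih _ (pvShape_popB h op)

theorem pvPops_eq {n m : Nat} :
    ∀ (ops : List (Int × Int)) (b : List (List Int)), pvShape n m b →
      ops.foldl (pvPopA n m) b = ops.foldl pvPopB b := by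
  intro ops
  induction ops with
  | nil => intro b _; rfl
  | cons op ops ih =>
    intro b h
    rw [List.foldl_cons, List.foldl_cons, pvPop_eq h op]
    exact ih _ (pvShape_popB h op)

theorem pvCols_eq {n m : Nat} (hn : 0 < n) :
    ∀ (js : List Nat) (b : List (List Int)), (∀ x ∈ js, x < m) → pvShape n m b →
      js.foldl (fun (bb : List (List Int)) (k : Nat) => pvClearTopA
        ((PySem.List.pyRange ((n : Int) - 1) (-1) (-1)).foldl (pvGravStepA (k : Int))
          (bb, (n : Int) - 1)).1
        ((PySem.List.pyRange ((n : Int) - 1) (-1) (-1)).foldl (pvGravStepA (k : Int))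
          (bb, (n : Int) - 1)).2 (k : Int)) b
      = js.foldl pvGravColB b := by
  intro js
  induction js with
  | nil => intro b _ _; rfl
  | cons k js ih =>
    intro b hmem h
    rw [List.foldl_cons, List.foldl_cons]
    rw [pvGravCol_eq h hn (hmem k (by simp))]
    exact ih _ (fun x hx => hmem x (by simp [hx])) (pvShape_gravColB h k)


-- ===== VERDICT (by name: the statement is the Claim_ definition above) =====
theorem solution_spec : Claim_equal_solution := by
  intro bubbles operations _ hpre
  unfold Spec_solution
  obtain ⟨hne, hrect, -⟩ := hpre
  have hn : 0 < bubbles.length := List.length_pos_iff.mpr hne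
  have hshape : pvShape bubbles.length (bubbles.headD []).length bubbles := ⟨rfl, hrect⟩
  simp only [solution, solution_alt]
  rw [pvPops_eq operations bubbles hshape]
  have hb1 := pvPops_shape operations bubbles hshape
  have hhead : ((operations.foldl pvPopB bubbles).headD []).length =
      (bubbles.headD []).length := by
    rcases hfold : operations.foldl pvPopB bubbles with _ | ⟨r, t⟩
    · rw [hfold] at hb1; exact absurd hb1.1.symm (by simpa using hn.ne')
    · rw [hfold] at hb1
      simpa using hb1.2 r (by simp)
  rw [hhead, PySem.List.pyRange_zero_natCast, List.foldl_map]
  exact pvCols_eq hn (List.range (bubbles.headD []).length)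
    (operations.foldl pvPopB bubbles) (by simp) hb1
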